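-- pv_equiv track=rewrite | github.com/Paolettinic/Uarm-cooperation | RobotModel/__init__.py | getFreeSlots
-- ===== SOURCE A (Python) =====
-- def getFreeSlots(object_list: dict, slots):
--     free_slots = []
--     for x, y in slots:
--         found = False
--         for color, (px, py, pz) in object_list.items():
--             if found:
--                 break
--             if x + 10 >= px >= x - 10 and y + 10 >= py >= y - 10:
--                 found = True
--         if not found:
--             free_slots.append((x, y))
--     return free_slots
-- ===== SOURCE B (Python) =====
-- def getFreeSlots(object_list: dict, slots):
--     # Spatial hash grid, cell size 10: each object is bucketed by (px//10, py//10);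
--     # a slot only needs to inspect its 3x3 neighborhood of cells.
--     grid = {}
--     for px, py, pz in object_list.values():
--         grid.setdefault((px // 10, py // 10), []).append((px, py))
--     free_slots = []
--     for x, y in slots:
--         cx, cy = x // 10, y // 10
--         hit = False
--         for dx in (-1, 0, 1):
--             for dy in (-1, 0, 1):
--                 for px, py in grid.get((cx + dx, cy + dy), ()):
--                     if abs(px - x) <= 10 and abs(py - y) <= 10:
--                         hit = True
--                         break
--                 if hit:
--                     break
--             if hit:
--                 break
--         if not hit:
--             free_slots.append((x, y))
--     return free_slots
-- ===== Notes on version B (the rewrite author's own statement) =====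
-- stated objective: faster
-- what changed: Replaced the per-slot linear scan over all objects by a spatial hash grid (cell size 10) built once, so each slot only inspects the objects bucketed in its 3x3 neighborhood of cells.
import Mathlib
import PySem

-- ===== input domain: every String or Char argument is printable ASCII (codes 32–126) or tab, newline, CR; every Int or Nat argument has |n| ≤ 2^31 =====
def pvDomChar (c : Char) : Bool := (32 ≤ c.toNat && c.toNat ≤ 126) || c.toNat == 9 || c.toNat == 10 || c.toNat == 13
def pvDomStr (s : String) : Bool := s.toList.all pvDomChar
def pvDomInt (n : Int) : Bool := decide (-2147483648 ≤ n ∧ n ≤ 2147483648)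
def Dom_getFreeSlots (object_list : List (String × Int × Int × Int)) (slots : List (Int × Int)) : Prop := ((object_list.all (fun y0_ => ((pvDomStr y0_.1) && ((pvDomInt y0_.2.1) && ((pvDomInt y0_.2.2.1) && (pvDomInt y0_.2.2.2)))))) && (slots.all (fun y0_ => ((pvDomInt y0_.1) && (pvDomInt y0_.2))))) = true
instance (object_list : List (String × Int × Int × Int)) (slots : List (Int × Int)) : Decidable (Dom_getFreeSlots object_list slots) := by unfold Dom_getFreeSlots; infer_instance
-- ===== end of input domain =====

-- B replaces A's per-slot scan over all objects by a spatial hash grid (cell size 10) queried on a 3x3 neighborhood.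

-- ===== PORT A =====
-- inner 'for color, (px, py, pz) in object_list.items()' loop with the found-flag and break
def pvAnyNear (x y : Int) : List (String × Int × Int × Int) → Bool
  | [] => false
  | o :: rest =>
      if x + 10 ≥ o.2.1 ∧ o.2.1 ≥ x - 10 ∧ y + 10 ≥ o.2.2.1 ∧ o.2.2.1 ≥ y - 10 then true
      else pvAnyNear x y rest

def getFreeSlots (object_list : List (String × Int × Int × Int)) (slots : List (Int × Int)) : List (Int × Int) :=
  slots.foldl (fun free_slots s =>
    if pvAnyNear s.1 s.2 object_list then free_slots else free_slots ++ [s]) []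

-- ===== PORT B =====
-- grid = {}; for px, py, pz in object_list.values(): grid.setdefault((px//10, py//10), []).append((px, py))
def pvBuildGrid (object_list : List (String × Int × Int × Int)) : PySem.Dict (Int × Int) (List (Int × Int)) :=
  object_list.foldl (fun d o =>
    d.modify (PySem.Int.floordiv o.2.1 10, PySem.Int.floordiv o.2.2.1 10) [] (· ++ [(o.2.1, o.2.2.1)]))
    PySem.Dict.empty

-- inner 'for px, py in grid.get(...)' loop with break
def pvCellHit (x y : Int) (l : List (Int × Int)) : Bool :=
  l.any (fun p => decide (|p.1 - x| ≤ 10 ∧ |p.2 - y| ≤ 10))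

-- the dx/dy loops over (-1, 0, 1) with breaks
def pvGridHit (grid : PySem.Dict (Int × Int) (List (Int × Int))) (x y : Int) : Bool :=
  [(-1 : Int), 0, 1].any (fun dx => [(-1 : Int), 0, 1].any (fun dy =>
    pvCellHit x y (grid.getD (PySem.Int.floordiv x 10 + dx, PySem.Int.floordiv y 10 + dy) [])))

def getFreeSlots_alt (object_list : List (String × Int × Int × Int)) (slots : List (Int × Int)) : List (Int × Int) :=
  let grid := pvBuildGrid object_list
  slots.foldl (fun free_slots s =>
    if pvGridHit grid s.1 s.2 then free_slots else free_slots ++ [s]) []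

-- ===== PRECONDITION & SPEC =====
def Spec_getFreeSlots (object_list : List (String × Int × Int × Int)) (slots : List (Int × Int)) (out : List (Int × Int)) : Prop := out = getFreeSlots_alt object_list slots
instance (object_list : List (String × Int × Int × Int)) (slots : List (Int × Int)) (out : List (Int × Int)) : Decidable (Spec_getFreeSlots object_list slots out) := by unfold Spec_getFreeSlots; infer_instance

-- ===== CLAIM (what is proved, stated in full; the proofs are below) =====
def Claim_equal_getFreeSlots : Prop := ∀ (object_list : List (String × Int × Int × Int)) (slots : List (Int × Int)), Dom_getFreeSlots object_list slots → Spec_getFreeSlots object_list slots (getFreeSlots object_list slots)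

-- ===== LEMMAS AND PROOFS =====

lemma pvAnyNear_eq_any (x y : Int) (l : List (String × Int × Int × Int)) :
    pvAnyNear x y l = l.any (fun o => decide (|o.2.1 - x| ≤ 10 ∧ |o.2.2.1 - y| ≤ 10)) := by
  induction l with
  | nil => rfl
  | cons o rest ih =>
      simp only [pvAnyNear, List.any_cons, ih]
      by_cases h : x + 10 ≥ o.2.1 ∧ o.2.1 ≥ x - 10 ∧ y + 10 ≥ o.2.2.1 ∧ o.2.2.1 ≥ y - 10
      · have hd : decide (|o.2.1 - x| ≤ 10 ∧ |o.2.2.1 - y| ≤ 10) = true := by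
          rw [decide_eq_true_iff, abs_le, abs_le]; omega
        rw [if_pos h, hd]; rfl
      · have hd : decide (|o.2.1 - x| ≤ 10 ∧ |o.2.2.1 - y| ≤ 10) = false := by
          rw [decide_eq_false_iff_not, abs_le, abs_le]; omega
        rw [if_neg h, hd]; rfl

lemma pvBuildGrid_getD (object_list : List (String × Int × Int × Int)) (c : Int × Int) :
    (pvBuildGrid object_list).getD c [] =
      ((object_list.map (fun o =>
          ((PySem.Int.floordiv o.2.1 10, PySem.Int.floordiv o.2.2.1 10), (o.2.1, o.2.2.1)))).filter
        (fun p => p.1 == c)).map (·.2) := by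
  unfold pvBuildGrid
  have hm : object_list.foldl (fun d o =>
        d.modify (PySem.Int.floordiv o.2.1 10, PySem.Int.floordiv o.2.2.1 10) [] (· ++ [(o.2.1, o.2.2.1)]))
        PySem.Dict.empty
      = ((object_list.map (fun o =>
          ((PySem.Int.floordiv o.2.1 10, PySem.Int.floordiv o.2.2.1 10), (o.2.1, o.2.2.1)))).foldl
          (fun d (p : (Int × Int) × (Int × Int)) => d.modify p.1 [] (· ++ [p.2])) PySem.Dict.empty) :=
    by rw [List.foldl_map]
  rw [hm, PySem.Dict.getD_foldl_modify_append, PySem.Dict.getD_empty]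
  simp

lemma pvFloordiv_near (a b : Int) (h : |a - b| ≤ 10) :
    ∃ dx ∈ [(-1 : Int), 0, 1], PySem.Int.floordiv a 10 = PySem.Int.floordiv b 10 + dx := by
  rw [abs_le] at h
  rw [PySem.Int.floordiv_eq_ediv_of_pos (by norm_num), PySem.Int.floordiv_eq_ediv_of_pos (by norm_num)]
  have h1 : b / 10 - 1 ≤ a / 10 ∧ a / 10 ≤ b / 10 + 1 := by omega
  rcases lt_trichotomy (a / 10) (b / 10) with hlt | heq | hgt
  · exact ⟨-1, by simp, by omega⟩
  · exact ⟨0, by simp, by omega⟩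
  · exact ⟨1, by simp, by omega⟩

lemma pvGridHit_eq_any (object_list : List (String × Int × Int × Int)) (x y : Int) :
    pvGridHit (pvBuildGrid object_list) x y
      = object_list.any (fun o => decide (|o.2.1 - x| ≤ 10 ∧ |o.2.2.1 - y| ≤ 10)) := by
  rw [Bool.eq_iff_iff]
  constructor
  · intro h
    simp only [pvGridHit, pvCellHit, List.any_eq_true] at h
    obtain ⟨dx, _, dy, _, p, hp, hbox⟩ := h
    rw [pvBuildGrid_getD] at hp
    simp only [List.mem_map, List.mem_filter, List.mem_map] at hp
    obtain ⟨q, ⟨⟨o, ho, rfl⟩, _⟩, rfl⟩ := hp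
    simp only [List.any_eq_true]
    exact ⟨o, ho, hbox⟩
  · intro h
    simp only [List.any_eq_true] at h
    obtain ⟨o, ho, hbox⟩ := h
    have hb := of_decide_eq_true hbox
    obtain ⟨dx, hdx, hex⟩ := pvFloordiv_near o.2.1 x hb.1
    obtain ⟨dy, hdy, hey⟩ := pvFloordiv_near o.2.2.1 y hb.2
    simp only [pvGridHit, pvCellHit, List.any_eq_true]
    refine ⟨dx, hdx, dy, hdy, (o.2.1, o.2.2.1), ?_, hbox⟩
    rw [pvBuildGrid_getD]
    simp only [List.mem_map, List.mem_filter, List.mem_map]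
    exact ⟨((PySem.Int.floordiv o.2.1 10, PySem.Int.floordiv o.2.2.1 10), (o.2.1, o.2.2.1)),
      ⟨⟨o, ho, rfl⟩, by simp only [beq_iff_eq, Prod.mk.injEq]; exact ⟨hex, hey⟩⟩, rfl⟩

-- ===== VERDICT (by name: the statement is the Claim_ definition above) =====
theorem getFreeSlots_spec : Claim_equal_getFreeSlots := by
  intro object_list slots _
  unfold Spec_getFreeSlots getFreeSlots getFreeSlots_alt
  have hfn : (fun (free_slots : List (Int × Int)) (s : Int × Int) =>
        if pvAnyNear s.1 s.2 object_list then free_slots else free_slots ++ [s])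
      = (fun free_slots s =>
        if pvGridHit (pvBuildGrid object_list) s.1 s.2 then free_slots else free_slots ++ [s]) := by
    funext acc s
    rw [pvAnyNear_eq_any, ← pvGridHit_eq_any]
  rw [hfn]
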